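-- pv_equiv track=rewrite | github.com/yingl/LintCodeInPython | min-deletions-to-obtain-string-in-right-format.py | minDeletionsToObtainStringInRightFormat
-- ===== SOURCE A (Python) =====
-- def minDeletionsToObtainStringInRightFormat(s):
--     # write your code here
--     ret = len(s)
--     counting = []
--     nums_a = 0
--     nums_b = 0
--     for c in s:
--         counting.append([nums_b, 0])
--         if c == 'B':
--             nums_b += 1
--     for i in range(len(s) - 1, -1, -1):
--         c = s[i]
--         counting[i][1] = nums_a
--         if c == 'A':
--             nums_a += 1
--     for c in counting:
--         s = c[0] + c[1]
--         if s < ret: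
--             ret = s
--     return ret
-- ===== SOURCE B (Python) =====
-- def minDeletionsToObtainStringInRightFormat(s):
--     b = 0
--     ret = 0
--     for c in s:
--         if c == 'B':
--             b += 1
--         elif c == 'A':
--             ret = min(ret + 1, b)
--     return ret
-- ===== Notes on version B (the rewrite author's own statement) =====
-- stated objective: simpler
-- what changed: Replaces A's three passes with an auxiliary table (forward B-prefix counts, backward A-suffix counts, final min-scan) by a single left-to-right DP keeping only two integers (B's seen so far, running minimum deletions), O(1) extra space.
import Mathlib
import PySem

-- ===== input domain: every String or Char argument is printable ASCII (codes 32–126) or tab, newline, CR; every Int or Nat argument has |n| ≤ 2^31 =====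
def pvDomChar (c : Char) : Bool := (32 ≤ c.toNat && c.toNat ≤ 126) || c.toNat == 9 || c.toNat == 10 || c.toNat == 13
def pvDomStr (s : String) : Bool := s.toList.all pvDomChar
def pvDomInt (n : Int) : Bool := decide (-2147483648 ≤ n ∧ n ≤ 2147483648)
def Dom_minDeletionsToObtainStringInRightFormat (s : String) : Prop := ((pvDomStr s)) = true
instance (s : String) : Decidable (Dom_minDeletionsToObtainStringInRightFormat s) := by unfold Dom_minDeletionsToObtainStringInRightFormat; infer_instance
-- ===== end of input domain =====

-- B replaces A's three passes and O(n) table by a single left-to-right two-integer DP (simpler, O(1) extra space).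

-- ===== PORT A =====
-- forward loop body: counting.append([nums_b, 0]); if c == 'B': nums_b += 1
def pvFwdStep (st : List (Int × Int) × Int) (c : Char) : List (Int × Int) × Int :=
  (st.1 ++ [(st.2, 0)], if c = 'B' then st.2 + 1 else st.2)

-- counting[i][1] = v  (i is always in 0..len-1 here; Python would raise IndexError otherwise — unreachable)
def pvSetSnd (C : List (Int × Int)) (i : Int) (v : Int) : List (Int × Int) :=
  if 0 ≤ i then C.set i.toNat ((C.getD i.toNat (0, 0)).1, v) else C

-- backward loop body: c = s[i]; counting[i][1] = nums_a; if c == 'A': nums_a += 1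
-- (s[i] via pyGetD: i ∈ range(len(s)-1, -1, -1) is always in range, so exact)
def pvBwdStep (l : List Char) (st : List (Int × Int) × Int) (i : Int) : List (Int × Int) × Int :=
  let c := PySem.List.pyGetD l i ' '
  (pvSetSnd st.1 i st.2, if c = 'A' then st.2 + 1 else st.2)

-- final loop body: s = c[0] + c[1]; if s < ret: ret = s
def pvMinStep (r : Int) (p : Int × Int) : Int := if p.1 + p.2 < r then p.1 + p.2 else r

def minDeletionsToObtainStringInRightFormat (s : String) : Int :=
  let l := s.toList
  let ret : Int := PySem.Str.len s
  let fwd := l.foldl pvFwdStep ([], 0)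
  let bwd := (PySem.List.pyRange (PySem.Str.len s - 1) (-1) (-1)).foldl (pvBwdStep l) (fwd.1, 0)
  bwd.1.foldl pvMinStep ret

-- ===== PORT B =====
-- Source B loop body: if c == 'B': b += 1; elif c == 'A': ret = min(ret + 1, b)
def pvAltStep (st : Int × Int) (c : Char) : Int × Int :=
  if c = 'B' then (st.1 + 1, st.2)
  else if c = 'A' then (st.1, min (st.2 + 1) st.1)
  else st

def minDeletionsToObtainStringInRightFormat_alt (s : String) : Int :=
  (s.toList.foldl pvAltStep (0, 0)).2

-- ===== PRECONDITION & SPEC =====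
def Spec_minDeletionsToObtainStringInRightFormat (s : String) (out : Int) : Prop := out = minDeletionsToObtainStringInRightFormat_alt s
instance (s : String) (out : Int) : Decidable (Spec_minDeletionsToObtainStringInRightFormat s out) := by unfold Spec_minDeletionsToObtainStringInRightFormat; infer_instance

-- ===== CLAIM (what is proved, stated in full; the proofs are below) =====
def Claim_equal_minDeletionsToObtainStringInRightFormat : Prop := ∀ (s : String), Dom_minDeletionsToObtainStringInRightFormat s → Spec_minDeletionsToObtainStringInRightFormat s (minDeletionsToObtainStringInRightFormat s)

-- ===== LEMMAS AND PROOFS =====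

-- number of 'B' / 'A' in a char list, as Int
def cntB : List Char → Int
  | [] => 0
  | c :: l => (if c = 'B' then 1 else 0) + cntB l

def cntA : List Char → Int
  | [] => 0
  | c :: l => (if c = 'A' then 1 else 0) + cntA l

-- the common mathematical value: min deletions to reach A*B* form
def M : List Char → Int
  | [] => 0
  | c :: l => if c = 'B' then min (cntA l) (M l + 1) else M l

theorem cntA_append (l t : List Char) : cntA (l ++ t) = cntA l + cntA t := by
  induction l with
  | nil => simp [cntA]
  | cons c l ih => simp [cntA, ih]; ring

theorem cntB_append (l t : List Char) : cntB (l ++ t) = cntB l + cntB t := by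
  induction l with
  | nil => simp [cntB]
  | cons c l ih => simp [cntB, ih]; ring

theorem cntA_nonneg (l : List Char) : 0 ≤ cntA l := by
  induction l with
  | nil => simp [cntA]
  | cons c l ih => simp [cntA]; split <;> omega

theorem cntA_le_len (l : List Char) : cntA l ≤ l.length := by
  induction l with
  | nil => simp [cntA]
  | cons c l ih => simp [cntA]; split <;> omega

theorem M_le_cntA (l : List Char) : M l ≤ cntA l := by
  induction l with
  | nil => simp [M, cntA]
  | cons c l ih => have h := cntA_nonneg l; simp [M, cntA]; split_ifs <;> omega

theorem M_append (l : List Char) (c : Char) :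
    M (l ++ [c]) = if c = 'B' then M l
      else if c = 'A' then min (M l + 1) (cntB l) else M l := by
  induction l with
  | nil => simp [M, cntA, cntB]
  | cons a l ih =>
    simp only [List.cons_append, M, cntA_append, cntB, cntA, ih]
    have h1 := M_le_cntA l
    split_ifs <;> simp_all <;> omega

-- ============ B side ============
theorem alt_fold (l : List Char) : l.foldl pvAltStep (0, 0) = (cntB l, M l) := by
  induction l using List.reverseRecOn with
  | nil => simp [cntB, M]
  | append_singleton l c ih =>
    rw [List.foldl_append, ih, M_append, cntB_append]
    simp only [List.foldl, pvAltStep, cntB]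
    split_ifs <;> simp_all

-- ============ A side ============
-- the countdown range(len-1, -1, -1) as a structural list
def drange : Nat → List Int
  | 0 => []
  | n + 1 => (n : Int) :: drange n

theorem pyRange_countdown (n : Nat) :
    PySem.List.pyRange ((n : Int) - 1) (-1) (-1) = drange n := by
  induction n with
  | zero => simp [drange, PySem.List.pyRange_neg_one_eq_nil]
  | succ n ih =>
    have h : (-1 : Int) < ((n + 1 : Nat) : Int) - 1 := by push_cast; omega
    rw [PySem.List.pyRange_neg_one_cons h, drange]
    congr 1
    · push_cast; ring
    · have he : ((n + 1 : Nat) : Int) - 1 - 1 = (n : Int) - 1 := by push_cast; ring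
      rw [he, ih]

-- forward pass result: table of prefix B-counts
def tblB (l : List Char) (b : Int) : List (Int × Int) :=
  (List.range l.length).map (fun j => (b + cntB (l.take j), (0 : Int)))

theorem fwd_spec (l : List Char) : ∀ (acc : List (Int × Int)) (b : Int),
    l.foldl pvFwdStep (acc, b) = (acc ++ tblB l b, b + cntB l) := by
  induction l with
  | nil => intro acc b; simp [tblB, cntB]
  | cons c l ih =>
    intro acc b
    show l.foldl pvFwdStep (pvFwdStep (acc, b) c) = _
    rw [pvFwdStep, ih]
    simp only [Prod.mk.injEq]
    refine ⟨?_, ?_⟩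
    · simp only [tblB, List.length_cons, List.range_succ_eq_map, List.map_cons, List.map_map]
      simp [List.append_assoc, Function.comp, List.take_succ_cons, cntB]
      intro a ha
      split_ifs <;> omega
    · simp only [cntB]; split <;> omega

-- the table after the backward pass
def tbl (l : List Char) : List (Int × Int) :=
  (List.range l.length).map (fun j => (cntB (l.take j), cntA (l.drop (j + 1))))

-- state of the backward pass after processing indices m-1 … 0
def upd (C : List (Int × Int)) (l : List Char) (m : Nat) (a : Int) : List (Int × Int) :=
  C.mapIdx (fun j p => if j < m then (p.1, a + cntA ((l.take m).drop (j + 1))) else p)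

theorem bwd_spec (l : List Char) : ∀ (m : Nat) (C : List (Int × Int)) (a : Int),
    m ≤ l.length → C.length = l.length →
    (drange m).foldl (pvBwdStep l) (C, a) = (upd C l m a, a + cntA (l.take m)) := by
  intro m
  induction m with
  | zero =>
    intro C a _ _
    simp only [drange, List.foldl_nil, upd, List.take_zero, cntA, Prod.mk.injEq]
    refine ⟨?_, ?_⟩
    · apply List.ext_getElem <;> simp
    · omega
  | succ m ih =>
    intro C a hm hC
    have hmlt : m < l.length := by omega
    show (drange m).foldl (pvBwdStep l) (pvBwdStep l (C, a) (m : Int)) = _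
    have hget : PySem.List.pyGetD l (m : Int) ' ' = l[m] := by
      rw [PySem.List.pyGetD_natCast]; simp [List.getD, hmlt]
    have hsets : pvSetSnd C (m : Int) a = C.set m ((C[m]'(by omega)).1, a) := by
      rw [pvSetSnd]
      simp [List.getD, hC, hmlt]
    rw [pvBwdStep, hget, hsets, ih _ _ (by omega) (by simp [hC])]
    have htake : l.take (m + 1) = l.take m ++ [l[m]] := by
      rw [List.take_add_one]; simp [hmlt]
    simp only [Prod.mk.injEq]
    refine ⟨?_, ?_⟩
    · -- list part
      apply List.ext_getElem
      · simp [upd]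
      · intro j hj1 hj2
        have hjC : j < C.length := by simpa [upd] using hj1
        simp only [upd, List.getElem_mapIdx]
        by_cases hjm : j < m
        · have hne : m ≠ j := by omega
          have hdrop : (l.take (m+1)).drop (j+1) = (l.take m).drop (j+1) ++ [l[m]] := by
            rw [htake, List.drop_append_of_le_length (by simp; omega)]
          simp [hjm, (by omega : j < m + 1), hne, hdrop, cntA_append, cntA]
          try (split <;> omega)
        · by_cases hjem : j = m
          · have hdrop : (l.take (m+1)).drop (j+1) = [] := by
              apply List.drop_eq_nil_of_le; simp; omega
            simp [hjem, cntA]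
          · simp only [List.getElem_set, if_neg hjm]
            rw [if_neg (show ¬ m = j by omega), if_neg (show ¬ j < m + 1 by omega)]
    · -- counter part
      rw [htake, cntA_append]
      simp [cntA]; split <;> omega

theorem upd_tblB (l : List Char) : upd (tblB l 0) l l.length 0 = tbl l := by
  apply List.ext_getElem
  · simp [upd, tblB, tbl]
  · intro j hj1 hj2
    have hjl : j < l.length := by simpa [tbl] using hj2
    simp [upd, tblB, tbl, List.getElem_mapIdx, hjl]

-- the final min-scan: algebra of foldl pvMinStep
theorem minStep_eq (r : Int) (p : Int × Int) : pvMinStep r p = min r (p.1 + p.2) := by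
  rw [pvMinStep]; split <;> omega

theorem F_min (t : List (Int × Int)) : ∀ (r r' : Int),
    t.foldl pvMinStep (min r r') = min r (t.foldl pvMinStep r') := by
  induction t with
  | nil => intro r r'; simp
  | cons p t ih =>
    intro r r'
    simp only [List.foldl_cons, minStep_eq]
    rw [min_assoc, ih]

theorem F_le (t : List (Int × Int)) : ∀ (r : Int), t.foldl pvMinStep r ≤ r := by
  induction t with
  | nil => intro r; simp
  | cons p t ih =>
    intro r
    simp only [List.foldl_cons, minStep_eq]
    calc t.foldl pvMinStep (min r (p.1 + p.2)) ≤ min r (p.1 + p.2) := ih _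
      _ ≤ r := by omega

theorem F_shift (t : List (Int × Int)) : ∀ (r δ : Int),
    (t.map (fun p => (p.1 + δ, p.2))).foldl pvMinStep (δ + r) = δ + t.foldl pvMinStep r := by
  induction t with
  | nil => intro r δ; simp
  | cons p t ih =>
    intro r δ
    simp only [List.map_cons, List.foldl_cons, minStep_eq]
    have : min (δ + r) (p.1 + δ + p.2) = δ + min r (p.1 + p.2) := by omega
    rw [this, ih]

-- two initial values ≥ the running values give the same fold (via F_min both ways)
theorem F_swap (t : List (Int × Int)) (r r' : Int) :
    min r (t.foldl pvMinStep r') = min r' (t.foldl pvMinStep r) := by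
  rw [← F_min, min_comm, F_min]

theorem tbl_cons (c : Char) (l : List Char) :
    tbl (c :: l) = ((0 : Int), cntA l) ::
      (tbl l).map (fun p => (p.1 + (if c = 'B' then 1 else 0), p.2)) := by
  simp only [tbl, List.length_cons, List.range_succ_eq_map, List.map_cons, List.map_map,
    List.cons.injEq]
  refine ⟨?_, ?_⟩
  · simp [cntB]
  · congr 1
    funext j
    simp [Function.comp, List.take_succ_cons, cntB]
    ring

theorem A_main (l : List Char) : (tbl l).foldl pvMinStep (l.length : Int) = M l := by
  induction l with
  | nil => simp [tbl, M]
  | cons c l ih =>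
    have hle := cntA_le_len l
    have hM := M_le_cntA l
    rw [tbl_cons]
    simp only [List.foldl_cons, minStep_eq, List.length_cons]
    have hmin : min ((l.length + 1 : Nat) : Int) (0 + cntA l) = cntA l := by
      push_cast; omega
    rw [hmin]
    by_cases hc : c = 'B'
    · have hone : ((tbl l).map (fun p => (p.1 + (if ('B' : Char) = 'B' then 1 else 0), p.2)))
          = (tbl l).map (fun p => (p.1 + 1, p.2)) := by norm_num
      have h1 : cntA l = 1 + (cntA l - 1) := by omega
      rw [hc, hone, h1, F_shift]
      have h2 : min (cntA l - 1) ((tbl l).foldl pvMinStep (l.length : Int)) =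
          min ((l.length : Nat) : Int) ((tbl l).foldl pvMinStep (cntA l - 1)) := F_swap _ _ _
      have h3 := F_le (tbl l) (cntA l - 1)
      rw [ih] at h2
      have hMB : M ('B' :: l) = min (cntA l) (M l + 1) := by simp [M]
      rw [hMB]
      omega
    · have hid : (tbl l).map (fun p => (p.1 + (if c = 'B' then 1 else 0), p.2)) = tbl l := by
        simp [hc]
      rw [hid]
      have h2 : min (cntA l) ((tbl l).foldl pvMinStep (l.length : Int)) =
          min ((l.length : Nat) : Int) ((tbl l).foldl pvMinStep (cntA l)) := F_swap _ _ _
      have h3 := F_le (tbl l) (cntA l)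
      rw [ih] at h2
      simp only [M, if_neg hc]
      omega

theorem A_eq_M (s : String) :
    minDeletionsToObtainStringInRightFormat s = M s.toList := by
  rw [minDeletionsToObtainStringInRightFormat]
  simp only [PySem.Str.len_eq]
  rw [fwd_spec, pyRange_countdown]
  simp only [List.nil_append]
  rw [bwd_spec s.toList s.toList.length (tblB s.toList 0) 0 (le_refl _) (by simp [tblB])]
  simp only [upd_tblB]
  exact A_main s.toList

-- ===== VERDICT (by name: the statement is the Claim_ definition above) =====
theorem minDeletionsToObtainStringInRightFormat_spec : Claim_equal_minDeletionsToObtainStringInRightFormat := by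
  intro s _
  unfold Spec_minDeletionsToObtainStringInRightFormat minDeletionsToObtainStringInRightFormat_alt
  rw [alt_fold, A_eq_M]
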